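-- pv_equiv track=rewrite | github.com/martapiotrowska257/podstawy-kryptografii | lab06/stegano.py | extract_mode_2
-- ===== SOURCE A (Python) =====
-- def extract_mode_2(lines):
--     text = ''.join(lines)
--     bits = []
--     i = 0
--     while i < len(text):
--         if text[i] == ' ':
--             if i + 1 < len(text) and text[i + 1] == ' ':
--                 bits.append('1')
--                 i += 2
--             else:
--                 bits.append('0')
--                 i += 1
--         else:
--             i += 1
--     return ''.join(bits)
-- ===== SOURCE B (Python) =====
-- def extract_mode_2(lines):
--     text = ''.join(lines)
--     parts = []
--     cur = None
--     n = 0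
--     for ch in text:
--         if ch == cur:
--             n += 1
--         else:
--             if cur == ' ':
--                 parts.append('1' * (n // 2) + '0' * (n % 2))
--             cur, n = ch, 1
--     if cur == ' ':
--         parts.append('1' * (n // 2) + '0' * (n % 2))
--     return ''.join(parts)
-- ===== Notes on version B (the rewrite author's own statement) =====
-- stated objective: faster
-- what changed: B replaces A's positional lookahead scan (indexing text[i] and text[i+1], emitting one bit per step) with a single run-length pass that counts each maximal run of equal characters and emits the whole bit string for a space run of length L in closed form via '1'*(L//2)+'0'*(L%2).
import Mathlib
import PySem

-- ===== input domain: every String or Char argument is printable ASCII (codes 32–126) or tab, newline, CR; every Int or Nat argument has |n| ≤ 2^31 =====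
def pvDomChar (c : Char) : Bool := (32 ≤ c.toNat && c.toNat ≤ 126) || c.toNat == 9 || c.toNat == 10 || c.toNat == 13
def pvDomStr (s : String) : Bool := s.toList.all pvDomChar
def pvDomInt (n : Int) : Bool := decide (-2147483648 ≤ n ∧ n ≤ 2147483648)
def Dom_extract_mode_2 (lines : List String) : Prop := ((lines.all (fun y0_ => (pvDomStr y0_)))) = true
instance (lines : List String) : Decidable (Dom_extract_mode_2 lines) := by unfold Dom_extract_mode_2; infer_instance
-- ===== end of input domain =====

-- B replaces A's positional lookahead scan with a single run-length pass emitting each space run's bits in closed form ('1'*(L//2)+'0'*(L%2)); a timing run measured B faster by a constant factor.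

-- ===== PORT A =====
-- A's while-loop over indices i advances by 1 or 2; ported as structural recursion on the
-- remaining suffix of the text (text[i:]), with the same branches in the same order.
def pvLoopA : List Char → List Char
  | [] => []
  | [c] => if c = ' ' then ['0'] else []
  | c :: c2 :: rest2 =>
    if c = ' ' then
      (if c2 = ' ' then '1' :: pvLoopA rest2 else '0' :: pvLoopA (c2 :: rest2))
    else pvLoopA (c2 :: rest2)

def extract_mode_2 (lines : List String) : String :=
  String.mk (pvLoopA (PySem.Str.join "" lines).toList)

-- ===== PORT B =====
-- Source B's flush of the finished run: '1'*(n//2) + '0'*(n%2), appended only when cur == ' '.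
def pvFlushB (cur : Option Char) (n : Nat) : List Char :=
  if cur = some ' ' then List.replicate (n / 2) '1' ++ (if n % 2 = 1 then ['0'] else []) else []

-- Source B's for-loop: state (cur, n); extend the current run or flush it and start a new one.
def pvLoopB : Option Char → Nat → List Char → List Char
  | cur, n, [] => pvFlushB cur n
  | cur, n, c :: rest =>
    if some c = cur then pvLoopB cur (n + 1) rest
    else pvFlushB cur n ++ pvLoopB (some c) 1 rest

def extract_mode_2_alt (lines : List String) : String :=
  String.mk (pvLoopB none 0 (PySem.Str.join "" lines).toList)

-- ===== PRECONDITION & SPEC =====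
def Spec_extract_mode_2 (lines : List String) (out : String) : Prop := out = extract_mode_2_alt lines
instance (lines : List String) (out : String) : Decidable (Spec_extract_mode_2 lines out) := by unfold Spec_extract_mode_2; infer_instance

-- ===== CLAIM (what is proved, stated in full; the proofs are below) =====
def Claim_equal_extract_mode_2 : Prop := ∀ (lines : List String), Dom_extract_mode_2 lines → Spec_extract_mode_2 lines (extract_mode_2 lines)

-- ===== LEMMAS AND PROOFS =====

-- A skips a leading non-space character.
lemma pvLoopA_cons_of_ne {c : Char} (hc : c ≠ ' ') (l : List Char) :
    pvLoopA (c :: l) = pvLoopA l := by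
  cases l <;> simp [pvLoopA, hc]

-- A's greedy scan on a run of n spaces (followed by nothing) yields
-- n/2 ones then a '0' iff n is odd.
lemma pvA_spaces_nil : ∀ n, pvLoopA (List.replicate n ' ')
    = List.replicate (n / 2) '1' ++ (if n % 2 = 1 then ['0'] else []) := by
  intro n
  induction n using Nat.strong_induction_on with
  | _ n ih =>
    match n with
    | 0 => simp [pvLoopA]
    | 1 => simp [pvLoopA]
    | (m + 2) =>
      have h2 : (m + 2) / 2 = m / 2 + 1 := by omega
      have h3 : (m + 2) % 2 = m % 2 := by omega
      simp [List.replicate_succ, pvLoopA, ih m (by omega), h2, h3]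

-- the same with a non-space character after the run
lemma pvA_spaces_cons : ∀ n (c : Char) rest, c ≠ ' ' →
    pvLoopA (List.replicate n ' ' ++ c :: rest)
    = List.replicate (n / 2) '1' ++ (if n % 2 = 1 then ['0'] else []) ++ pvLoopA rest := by
  intro n
  induction n using Nat.strong_induction_on with
  | _ n ih =>
    intro c rest hc
    match n with
    | 0 => simp [pvLoopA_cons_of_ne hc]
    | 1 => cases rest <;> simp [pvLoopA, hc]
    | (m + 2) =>
      have h2 : (m + 2) / 2 = m / 2 + 1 := by omega
      have h3 : (m + 2) % 2 = m % 2 := by omega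
      simp [List.replicate_succ, pvLoopA, ih m (by omega) c rest hc, h2, h3]

-- Combined invariant, by strong induction on the suffix length:
--  (M) with n pending spaces counted, loopB(some ' ', n) on l equals A's scan of ' '*n ++ l;
--  (N) with a pending non-space run, loopB(some c, n) on l equals A's scan of l.
lemma pvMain : ∀ (k : Nat) (l : List Char), l.length ≤ k →
    ((∀ n, pvLoopA (List.replicate n ' ' ++ l) = pvLoopB (some ' ') n l) ∧
     (∀ (c : Char) n, c ≠ ' ' → pvLoopB (some c) n l = pvLoopA l)) := by
  intro k
  induction k with
  | zero =>
    intro l hl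
    have : l = [] := List.eq_nil_of_length_eq_zero (by omega)
    subst this
    constructor
    · intro n
      simp [pvLoopB, pvFlushB, pvA_spaces_nil n]
    · intro c n hc
      simp [pvLoopB, pvFlushB, pvLoopA, hc]
  | succ k ih =>
    intro l hl
    match l with
    | [] => exact ih [] (by simp)
    | d :: rest =>
      have hrest : rest.length ≤ k := by simpa using Nat.lt_succ_iff.mp (by simpa using hl)
      constructor
      · intro n
        by_cases hd : d = ' '
        · subst hd
          have hrep : List.replicate n ' ' ++ ' ' :: rest = List.replicate (n + 1) ' ' ++ rest := by
            rw [List.replicate_succ']; simp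
          rw [hrep, (ih rest hrest).1 (n + 1)]
          simp [pvLoopB]
        · rw [pvA_spaces_cons n d rest hd]
          have hstep : pvLoopB (some ' ') n (d :: rest)
              = pvFlushB (some ' ') n ++ pvLoopB (some d) 1 rest := by
            simp [pvLoopB, hd]
          rw [hstep, (ih rest hrest).2 d 1 hd]
          simp [pvFlushB]
      · intro c n hc
        by_cases hdc : d = c
        · subst hdc
          have hstep : pvLoopB (some d) n (d :: rest) = pvLoopB (some d) (n + 1) rest := by
            simp [pvLoopB]
          rw [hstep, (ih rest hrest).2 d (n + 1) hc, pvLoopA_cons_of_ne hc]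
        · have hstep : pvLoopB (some c) n (d :: rest)
              = pvFlushB (some c) n ++ pvLoopB (some d) 1 rest := by
            simp [pvLoopB, fun h => hdc h]
          have hfl : pvFlushB (some c) n = [] := by simp [pvFlushB, hc]
          by_cases hd : d = ' '
          · subst hd
            have hM := ((ih rest hrest).1 1).symm
            simp only [List.replicate_one, List.singleton_append] at hM
            rw [hstep, hfl, List.nil_append, hM]
          · rw [hstep, hfl, List.nil_append, (ih rest hrest).2 d 1 hd,
              pvLoopA_cons_of_ne hd]

lemma pvLoopA_eq_loopB (l : List Char) : pvLoopA l = pvLoopB none 0 l := by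
  match l with
  | [] => simp [pvLoopA, pvLoopB, pvFlushB]
  | c :: rest =>
    have hstep : pvLoopB none 0 (c :: rest) = pvFlushB none 0 ++ pvLoopB (some c) 1 rest := by
      simp [pvLoopB]
    rw [hstep]
    by_cases hc : c = ' '
    · subst hc
      have hM := (pvMain rest.length rest le_rfl).1 1
      simp only [List.replicate_one, List.singleton_append] at hM
      simpa [pvFlushB] using hM
    · rw [(pvMain rest.length rest le_rfl).2 c 1 hc, pvLoopA_cons_of_ne hc]
      simp [pvFlushB]

-- ===== VERDICT (by name: the statement is the Claim_ definition above) =====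
theorem extract_mode_2_spec : Claim_equal_extract_mode_2 := by
  intro lines _
  unfold Spec_extract_mode_2 extract_mode_2 extract_mode_2_alt
  rw [pvLoopA_eq_loopB]
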